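-- pv_equiv track=rewrite | github.com/keepkeen/nanocode | memory/agent_memory_pkg/agent_memory/compression.py | _simple_tags
-- ===== SOURCE A (Python) =====
-- from typing import List, Sequence, Tuple
--
-- STOP_TAGS = {
--     "the", "a", "an", "and", "or", "to", "of", "for", "in", "on", "with", "that", "this", "is", "are",
--     "be", "as", "it", "we", "i", "you", "they", "he", "she", "at", "by", "from", "our", "my", "your",
-- }
--
-- def _simple_tags(text: str) -> List[str]:
--     terms = ["".join(ch.lower() if ch.isalnum() else " " for ch in text).split()]
--     flat = terms[0] if terms else []
--     uniq: List[str] = []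
--     seen = set()
--     for term in flat:
--         if len(term) < 3 or term in STOP_TAGS or term in seen:
--             continue
--         seen.add(term)
--         uniq.append(term)
--         if len(uniq) >= 8:
--             break
--     return uniq
-- ===== SOURCE B (Python) =====
-- STOP_TAGS = {
--     "the", "a", "an", "and", "or", "to", "of", "for", "in", "on", "with", "that", "this", "is", "are",
--     "be", "as", "it", "we", "i", "you", "they", "he", "she", "at", "by", "from", "our", "my", "your",
-- }
--
-- def _simple_tags(text):
--     words = "".join(ch.lower() if ch.isalnum() else " " for ch in text).split()
--     pending = [w for w in words if len(w) >= 3 and w not in STOP_TAGS]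
--     tags = []
--     # no seen-set: take the head, then purge its remaining duplicates from pending
--     while pending and len(tags) < 8:
--         w = pending[0]
--         tags.append(w)
--         pending = [x for x in pending[1:] if x != w]
--     return tags
-- ===== Notes on version B (the rewrite author's own statement) =====
-- stated objective: alternative
-- what changed: Replaces the seen-set/early-break scan by a staged algorithm: filter once, then at most 8 rounds that each take the head of the pending list and purge its duplicates from the remainder, so no membership structure is kept at all.
import Mathlib
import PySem

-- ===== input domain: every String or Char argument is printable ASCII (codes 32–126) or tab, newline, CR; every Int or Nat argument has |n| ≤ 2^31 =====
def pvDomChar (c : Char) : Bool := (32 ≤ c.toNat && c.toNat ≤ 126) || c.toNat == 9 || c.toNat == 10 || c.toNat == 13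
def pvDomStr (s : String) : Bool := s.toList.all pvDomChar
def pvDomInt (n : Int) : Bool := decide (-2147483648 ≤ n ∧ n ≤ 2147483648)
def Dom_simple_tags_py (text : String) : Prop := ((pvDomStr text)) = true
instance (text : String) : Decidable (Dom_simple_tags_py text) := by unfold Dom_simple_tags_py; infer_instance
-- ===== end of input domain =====

-- B replaces A's seen-set scan with early break by: filter once, then up to 8 rounds taking the head and purging its duplicates from the remainder (alternative decomposition; same cost).

-- ===== PORT A =====
def pvStop : PySem.Set String := PySem.Set.ofList
  ["the", "a", "an", "and", "or", "to", "of", "for", "in", "on", "with", "that", "this", "is", "are",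
   "be", "as", "it", "we", "i", "you", "they", "he", "she", "at", "by", "from", "our", "my", "your"]

-- the loop 'for term in flat: …' with its seen set, uniq accumulator and break at 8
def pvLoopA : List String → List String → PySem.Set String → List String
  | [], uniq, _ => uniq
  | term :: rest, uniq, seen =>
    if PySem.Str.len term < 3 || pvStop.contains term || seen.contains term then
      pvLoopA rest uniq seen
    else
      if 8 ≤ (uniq ++ [term]).length then uniq ++ [term]
      else pvLoopA rest (uniq ++ [term]) (PySem.Set.add seen term)

def simple_tags_py (text : String) : List String :=
  -- ''.join(ch.lower() if ch.isalnum() else ' ' for ch in text): each piece is one char, so join = the mapped chars (exact)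
  let terms := [PySem.Str.split₀ (String.ofList (text.toList.map
                  (fun ch => if PySem.Chars.isalnum ch then PySem.Chars.lowerChar ch else ' ')))]
  let flat := if terms.isEmpty then [] else terms.headD []   -- terms[0] if terms else []
  pvLoopA flat [] PySem.Set.empty

-- ===== PORT B =====
-- the while loop: take the head of pending into tags, purge its duplicates from the rest
def pvPick : List String → List String → List String
  | [], tags => tags
  | w :: rest, tags =>
    if 8 ≤ tags.length then tags
    else pvPick (rest.filter (fun x => !(x == w))) (tags ++ [w])
termination_by pending _ => pending.length
decreasing_by
  simp only [List.unattach_filter, List.unattach_attach]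
  exact Nat.lt_succ_of_le (List.length_filter_le _ _)

def simple_tags_py_alt (text : String) : List String :=
  let words := PySem.Str.split₀ (String.ofList (text.toList.map
                 (fun ch => if PySem.Chars.isalnum ch then PySem.Chars.lowerChar ch else ' ')))
  let pending := words.filter (fun w => 3 ≤ PySem.Str.len w && !(pvStop.contains w))
  pvPick pending []

-- ===== PRECONDITION & SPEC =====
def Spec_simple_tags_py (text : String) (out : List String) : Prop := out = simple_tags_py_alt text
instance (text : String) (out : List String) : Decidable (Spec_simple_tags_py text out) := by unfold Spec_simple_tags_py; infer_instance

-- ===== CLAIM (what is proved, stated in full; the proofs are below) =====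
def Claim_equal_simple_tags_py : Prop := ∀ (text : String), Dom_simple_tags_py text → Spec_simple_tags_py text (simple_tags_py text)

-- ===== LEMMAS AND PROOFS =====

-- A's loop, started with seen = uniq (as lists) and fewer than 8 entries, computes the
-- first-8 truncation of uniq extended by the new filtered-deduplicated words.
theorem pvLoopA_eq (flat : List String) : ∀ (seen : List String), seen.length < 8 →
    pvLoopA flat seen seen =
      (PySem.Set.update seen (flat.filter (fun w => 3 ≤ PySem.Str.len w && !(pvStop.contains w)))).take 8 := by
  induction flat with
  | nil =>
    intro seen h
    simp [pvLoopA, PySem.Set.update, List.take_of_length_le (Nat.le_of_lt h)]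
  | cons t rest ih =>
    intro seen h
    by_cases hkP : 3 ≤ t.length ∧ t ∉ pvStop
    · have hc : (decide (3 ≤ PySem.Str.len t) && !pvStop.contains t) = true := by
        simp
        exact ⟨hkP.1, hkP.2⟩
      by_cases hsP : t ∈ seen
      · -- kept by the filter but already seen: A skips, update.add is a no-op
        have hsc : PySem.Set.contains seen t = true := (PySem.Set.contains_iff seen t).mpr hsP
        have hg : (decide (PySem.Str.len t < 3) || pvStop.contains t || PySem.Set.contains seen t) = true := by
          simp
          exact Or.inr hsP
        rw [pvLoopA, if_pos hg, List.filter_cons, if_pos hc, PySem.Set.update_cons,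
            PySem.Set.add, if_pos hsc, ih seen h]
      · -- new kept word
        have hg : ¬ ((decide (PySem.Str.len t < 3) || pvStop.contains t || PySem.Set.contains seen t) = true) := by
          simp
          refine ⟨⟨?_, hkP.2⟩, hsP⟩
          omega
        have hadd : PySem.Set.add seen t = seen ++ [t] := by
          rw [PySem.Set.add, if_neg (by simp; exact hsP)]
        rw [pvLoopA, if_neg hg, List.filter_cons, if_pos hc, PySem.Set.update_cons, hadd]
        by_cases h8 : 8 ≤ (seen ++ [t]).length
        · -- uniq reached length 8: A breaks; take 8 of the extended update is exactly seen ++ [t]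
          rw [if_pos h8]
          have hlen : (seen ++ [t]).length = 8 := by
            simp at h8 ⊢; omega
          rw [PySem.Set.update_eq_append_filter, List.take_append_of_le_length (le_of_eq hlen.symm),
              List.take_of_length_le (le_of_eq hlen)]
        · rw [if_neg h8]
          exact ih (seen ++ [t]) (by simp at h8 ⊢; omega)
    · -- dropped by the filter: A's guard fires on the length/stop test
      have hc : ¬ ((decide (3 ≤ PySem.Str.len t) && !pvStop.contains t) = true) := by
        simp
        tauto
      have hg : (decide (PySem.Str.len t < 3) || pvStop.contains t || PySem.Set.contains seen t) = true := by
        simp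
        rw [not_and_or, not_le, not_not] at hkP
        tauto
      rw [pvLoopA, if_pos hg, List.filter_cons, if_neg hc, ih seen h]

-- ofList commutes with removing one element's duplicates up front
theorem ofList_filter_ne {α : Type} [DecidableEq α] (w : α) (xs : List α) :
    PySem.Set.ofList (xs.filter (fun x => !(x == w))) = (PySem.Set.ofList xs).filter (fun x => !(x == w)) := by
  induction xs with
  | nil => rfl
  | cons y ys ih =>
    by_cases hy : y = w
    · subst hy
      simp [PySem.Set.ofList_cons, PySem.Set.discard, List.filter_filter, ih]
    · simp [hy, PySem.Set.ofList_cons, PySem.Set.discard, List.filter_filter, ih]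
      apply List.filter_congr
      intro x _
      exact Bool.and_comm _ _

-- B's rounds compute the first-8 truncation of tags extended by the dedup of pending
theorem pvPick_eq : ∀ (ws tags : List String), tags.length ≤ 8 →
    pvPick ws tags = (tags ++ PySem.Set.ofList ws).take 8 := by
  intro ws
  induction hn : ws.length using Nat.strong_induction_on generalizing ws with
  | _ n ih =>
  match ws with
  | [] =>
    intro tags h
    simp [pvPick, PySem.Set.ofList, List.take_of_length_le h]
  | w :: rest =>
    intro tags h
    rw [pvPick]
    by_cases h8 : 8 ≤ tags.length
    · rw [if_pos h8, List.take_append_of_le_length h8, List.take_of_length_le h]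
    · rw [if_neg h8,
        ih (rest.filter (fun x => !(x == w))).length
          (by subst hn; exact Nat.lt_succ_of_le (List.length_filter_le _ _)) _ rfl _
          (by simp; omega)]
      rw [PySem.Set.ofList_cons, ofList_filter_ne]
      simp [PySem.Set.discard]

-- ===== VERDICT (by name: the statement is the Claim_ definition above) =====
theorem simple_tags_py_spec : Claim_equal_simple_tags_py := by
  intro text _
  unfold Spec_simple_tags_py simple_tags_py simple_tags_py_alt
  simp only [List.isEmpty_cons, List.headD_cons, if_neg (by decide : ¬(false = true))]
  rw [show PySem.Set.empty = ([] : List String) from rfl, pvLoopA_eq _ [] (by decide),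
      pvPick_eq _ [] (by decide)]
  simp [PySem.Set.update, PySem.Set.ofList_eq_foldl]
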